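-- pv_equiv track=rewrite | github.com/grapheneaffiliate/h4-polytopic-attention | solve_arc1_recovery.py | solve_22eb0ac0
-- ===== SOURCE A (Python) =====
-- def solve_22eb0ac0(grid):
--     """Triangle fill: fill between diagonal arms of same-color groups."""
--     rows, cols = len(grid), len(grid[0])
--     out = [row[:] for row in grid]
--     colors_positions = {}
--     for r in range(rows):
--         for c in range(cols):
--             v = grid[r][c]
--             if v != 0:
--                 if v not in colors_positions:
--                     colors_positions[v] = []
--                 colors_positions[v].append((r, c))
--     for color, positions in colors_positions.items():
--         for r in range(min(p[0] for p in positions), max(p[0] for p in positions)+1):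
--             cols_in_row = sorted([c for rr, c in positions if rr == r])
--             if len(cols_in_row) >= 2:
--                 for c in range(cols_in_row[0], cols_in_row[-1]+1):
--                     out[r][c] = color
--     return out
-- ===== SOURCE B (Python) =====
-- def solve_22eb0ac0(grid):
--     """One row-major pass records, per color and row, (first, last, count) of its
--     nonzero cells; then each recorded span with >= 2 cells is filled."""
--     rows, cols = len(grid), len(grid[0])
--     spans = {}
--     for r in range(rows):
--         row = grid[r]
--         for c in range(cols):
--             v = row[c]
--             if v != 0:
--                 rowspans = spans.get(v)
--                 if rowspans is None:
--                     rowspans = {}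
--                     spans[v] = rowspans
--                 if r in rowspans:
--                     mn, _, cnt = rowspans[r]
--                     rowspans[r] = (mn, c, cnt + 1)
--                 else:
--                     rowspans[r] = (c, c, 1)
--     out = [row[:] for row in grid]
--     for color, rowspans in spans.items():
--         for r, (mn, mx, cnt) in rowspans.items():
--             if cnt >= 2:
--                 for c in range(mn, mx + 1):
--                     out[r][c] = color
--     return out
-- ===== Notes on version B (the rewrite author's own statement) =====
-- stated objective: faster
-- what changed: Instead of storing every nonzero cell per color and then, for each color, rescanning its whole position list for every row of its row range (with a sort per row), B makes one row-major pass that records per (color,row) only (first,last,count) of that color's cells and then fills each recorded span with count>=2, preserving A's color-insertion and ascending-row write order.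
import Mathlib
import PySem

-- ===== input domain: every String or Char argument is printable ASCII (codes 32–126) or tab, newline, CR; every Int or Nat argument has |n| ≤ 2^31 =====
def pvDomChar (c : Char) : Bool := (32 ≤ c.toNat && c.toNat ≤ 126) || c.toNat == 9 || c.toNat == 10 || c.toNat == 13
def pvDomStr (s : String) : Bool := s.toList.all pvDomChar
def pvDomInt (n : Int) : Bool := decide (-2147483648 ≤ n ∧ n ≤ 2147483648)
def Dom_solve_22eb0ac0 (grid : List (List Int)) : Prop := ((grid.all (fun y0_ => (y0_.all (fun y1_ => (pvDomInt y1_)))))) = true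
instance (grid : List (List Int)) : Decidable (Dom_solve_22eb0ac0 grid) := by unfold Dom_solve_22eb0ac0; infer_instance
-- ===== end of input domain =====

-- B replaces A's per-color position lists (rescanned and re-sorted for every row of the
-- color's row range) by one row-major pass recording (first,last,count) per (color,row),
-- then fills every recorded span with count ≥ 2; same write order, asymptotically faster.

-- out[r][c] = v  (both Pythons perform exactly this assignment)
def pvSetAt (out : List (List Int)) (r c : Nat) (v : Int) : List (List Int) :=
  out.set r ((out.getD r []).set c v)

-- for c in range(c0, c1+1): out[r][c] = color   (the common innermost fill loop)
def pvFill (out : List (List Int)) (r c0 c1 : Nat) (color : Int) : List (List Int) :=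
  (List.range' c0 (c1 + 1 - c0)).foldl (fun o c => pvSetAt o r c color) out

-- ===== PORT A =====
def solve_22eb0ac0 (grid : List (List Int)) : List (List Int) :=
  let rows := grid.length
  let cols := (grid.headD []).length
  let cp : PySem.Dict Int (List (Nat × Nat)) :=
    (List.range rows).foldl (fun d r =>
      (List.range cols).foldl (fun d c =>
        let v := (grid.getD r []).getD c 0
        if v ≠ 0 then d.modify v [] (fun l => l ++ [(r, c)]) else d) d) PySem.Dict.empty
  cp.items.foldl (fun out p =>
    let color := p.1
    let positions := p.2
    let minr := (PySem.List.min? (positions.map Prod.fst) (fun x => x)).getD 0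
    let maxr := (PySem.List.max? (positions.map Prod.fst) (fun x => x)).getD 0
    (List.range' minr (maxr + 1 - minr)).foldl (fun out r =>
      let colsInRow := PySem.List.sorted ((positions.filter (fun q => q.1 == r)).map Prod.snd) (fun x => x) false
      if 2 ≤ colsInRow.length then
        pvFill out r (colsInRow.headD 0) (colsInRow.getLastD 0) color
      else out) out) grid

-- ===== PORT B =====
-- the (first,last,count) update B performs for one nonzero cell (r,c)
def pvUpd (rs : PySem.Dict Nat (Nat × Nat × Nat)) (p : Nat × Nat) :
    PySem.Dict Nat (Nat × Nat × Nat) :=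
  match rs.get? p.1 with
  | some (mn, _, cnt) => rs.insert p.1 (mn, p.2, cnt + 1)
  | none => rs.insert p.1 (p.2, p.2, 1)

def solve_22eb0ac0_alt (grid : List (List Int)) : List (List Int) :=
  let rows := grid.length
  let cols := (grid.headD []).length
  let spans : PySem.Dict Int (PySem.Dict Nat (Nat × Nat × Nat)) :=
    (List.range rows).foldl (fun d r =>
      (List.range cols).foldl (fun d c =>
        let v := (grid.getD r []).getD c 0
        if v ≠ 0 then d.modify v PySem.Dict.empty (fun rs => pvUpd rs (r, c)) else d) d)
      PySem.Dict.empty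
  spans.items.foldl (fun out p =>
    let color := p.1
    p.2.items.foldl (fun out q =>
      if 2 ≤ q.2.2.2 then pvFill out q.1 q.2.1 q.2.2.1 color else out) out) grid

-- ===== PRECONDITION & SPEC =====
-- Pre_ excludes exactly the inputs where Python A raises IndexError: the empty grid
-- (grid[0]) and grids with a row shorter than the first row (grid[r][c] in the scan).
def Pre_solve_22eb0ac0 (grid : List (List Int)) : Prop :=
  grid ≠ [] ∧ ∀ row ∈ grid, (grid.headD []).length ≤ row.length
instance (grid : List (List Int)) : Decidable (Pre_solve_22eb0ac0 grid) := by
  unfold Pre_solve_22eb0ac0; infer_instance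
def pvWitness_solve_22eb0ac0 : List (List Int) := [[1, 0, 1], [0, 2, 0], [2, 0, 2]]

def Spec_solve_22eb0ac0 (grid : List (List Int)) (out : List (List Int)) : Prop := out = solve_22eb0ac0_alt grid
instance (grid : List (List Int)) (out : List (List Int)) : Decidable (Spec_solve_22eb0ac0 grid out) := by unfold Spec_solve_22eb0ac0; infer_instance

-- ===== CLAIM (what is proved, stated in full; the proofs are below) =====
def Claim_equal_solve_22eb0ac0 : Prop := ∀ (grid : List (List Int)), Dom_solve_22eb0ac0 grid → Pre_solve_22eb0ac0 grid → Spec_solve_22eb0ac0 grid (solve_22eb0ac0 grid)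

-- ===== LEMMAS AND PROOFS =====

def pvVal (grid : List (List Int)) (p : Nat × Nat) : Int := (grid.getD p.1 []).getD p.2 0
def pvPairs (grid : List (List Int)) : List (Nat × Nat) :=
  (List.range grid.length).flatMap
    (fun r => (List.range (grid.headD []).length).map (fun c => (r, c)))
def pvCells (grid : List (List Int)) : List (Nat × Nat) :=
  (pvPairs grid).filter (fun p => decide (pvVal grid p ≠ 0))
def pvLex (p q : Nat × Nat) : Prop := p.1 < q.1 ∨ (p.1 = q.1 ∧ p.2 < q.2)
def pvSummar (ps : List (Nat × Nat)) : PySem.Dict Nat (Nat × Nat × Nat) :=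
  ps.foldl pvUpd PySem.Dict.empty
def pvRowsOf (ps : List (Nat × Nat)) : List Nat := PySem.Set.ofList (ps.map Prod.fst)
def pvColsOf (ps : List (Nat × Nat)) (r : Nat) : List Nat :=
  (ps.filter (fun q => q.1 == r)).map Prod.snd
def pvTriple (ps : List (Nat × Nat)) (r : Nat) : Nat × Nat × Nat :=
  ((pvColsOf ps r).headD 0, (pvColsOf ps r).getLastD 0, (pvColsOf ps r).length)

-- nested range loop = one loop over the row-major pair list
theorem pv_foldl_range_range {σ : Type} (R C : Nat) (F : σ → Nat → Nat → σ) (init : σ) :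
    (List.range R).foldl (fun d r => (List.range C).foldl (fun d c => F d r c) d) init
      = ((List.range R).flatMap (fun r => (List.range C).map (fun c => (r, c)))).foldl
          (fun d p => F d p.1 p.2) init := by
  rw [List.flatMap, List.foldl_flatten, List.foldl_map]
  refine PySem.List.foldl_congr_mem _ _ _ _ ?_
  intro acc r _
  rw [List.foldl_map]

-- lookups in a dict built by a modify-loop keyed by `key`
theorem pv_getD_foldl_modify_key {κ ν β : Type} [BEq κ] [LawfulBEq κ]
    (key : β → κ) (d0 : ν) (f : ν → β → ν) (l : List β) (d : PySem.Dict κ ν) (v : κ) :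
    (l.foldl (fun d a => d.modify (key a) d0 (fun x => f x a)) d).getD v d0
      = (l.filter (fun a => key a == v)).foldl f (d.getD v d0) := by
  induction l generalizing d with
  | nil => rfl
  | cons a l ih =>
    rw [List.foldl_cons, List.filter_cons, ih]
    by_cases h : key a = v
    · subst h
      simp [PySem.Dict.getD_modify_self]
    · have hne : v ≠ key a := fun hv => h hv.symm
      simp [PySem.Dict.getD_modify_of_ne _ _ _ hne, beq_iff_eq, h]

theorem pv_ofList_sublist {α : Type} [BEq α] (xs : List α) :
    (PySem.Set.ofList xs).Sublist xs := by
  induction xs using List.reverseRecOn with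
  | nil => simp [PySem.Set.ofList]
  | append_singleton l x ih =>
    rw [PySem.Set.ofList_eq_foldl, List.foldl_append, ← PySem.Set.ofList_eq_foldl]
    simp only [List.foldl_cons, List.foldl_nil, PySem.Set.add]
    split
    · exact ih.trans (List.sublist_append_left _ _)
    · exact ih.append (List.Sublist.refl [x])

theorem pv_pairs_pairwise (grid : List (List Int)) : (pvPairs grid).Pairwise pvLex := by
  rw [pvPairs, List.flatMap, List.pairwise_flatten]
  constructor
  · intro l hl
    rw [List.mem_map] at hl
    obtain ⟨r, -, rfl⟩ := hl
    rw [List.pairwise_map]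
    exact List.pairwise_lt_range.imp (fun h => Or.inr ⟨rfl, h⟩)
  · rw [List.pairwise_map]
    refine List.pairwise_lt_range.imp ?_
    intro r1 r2 h x hx y hy
    rw [List.mem_map] at hx hy
    obtain ⟨c1, -, rfl⟩ := hx
    obtain ⟨c2, -, rfl⟩ := hy
    exact Or.inl h

theorem pv_cells_pairwise (grid : List (List Int)) : (pvCells grid).Pairwise pvLex :=
  List.Pairwise.sublist List.filter_sublist (pv_pairs_pairwise grid)

theorem pv_pairwise_snd (r : Nat) (l : List (Nat × Nat)) (hl : l.Pairwise pvLex)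
    (hm : ∀ q ∈ l, q.1 = r) : l.Pairwise (fun a b => a.2 < b.2) := by
  induction l with
  | nil => exact List.Pairwise.nil
  | cons a l ih =>
    rw [List.pairwise_cons] at hl ⊢
    refine ⟨?_, ih hl.2 (fun q hq => hm q (List.mem_cons_of_mem a hq))⟩
    intro b hb
    have ha := hm a List.mem_cons_self
    have hbr := hm b (List.mem_cons_of_mem a hb)
    rcases hl.1 b hb with h1 | h2
    · omega
    · exact h2.2

theorem pv_colsOf_pairwise (ps : List (Nat × Nat)) (h : ps.Pairwise pvLex) (r : Nat) :
    (pvColsOf ps r).Pairwise (· < ·) := by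
  rw [pvColsOf, List.pairwise_map]
  refine pv_pairwise_snd r _ (List.Pairwise.sublist List.filter_sublist h) ?_
  intro q hq
  simpa using List.of_mem_filter hq

theorem pv_rowsOf_pairwise (ps : List (Nat × Nat)) (h : ps.Pairwise pvLex) :
    (pvRowsOf ps).Pairwise (· < ·) := by
  have hle : (ps.map Prod.fst).Pairwise (fun a b : Nat => a ≤ b) := by
    rw [List.pairwise_map]
    exact h.imp (fun hl => by rcases hl with h1 | h2 <;> omega)
  have hsub := pv_ofList_sublist (ps.map Prod.fst)
  have hle' : (pvRowsOf ps).Pairwise (fun a b : Nat => a ≤ b) :=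
    List.Pairwise.sublist hsub hle
  have hnd : (pvRowsOf ps).Nodup := PySem.Set.nodup_ofList _
  exact (hle'.and hnd).imp (fun ⟨h1, h2⟩ => lt_of_le_of_ne h1 h2)

theorem pv_mem_rowsOf (ps : List (Nat × Nat)) (r : Nat) :
    r ∈ pvRowsOf ps ↔ r ∈ ps.map Prod.fst := PySem.Set.mem_ofList _ _

theorem pv_colsOf_ne_nil_iff (ps : List (Nat × Nat)) (r : Nat) :
    pvColsOf ps r ≠ [] ↔ r ∈ ps.map Prod.fst := by
  rw [pvColsOf]
  simp only [ne_eq, List.map_eq_nil_iff, List.filter_eq_nil_iff, List.mem_map]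
  constructor
  · intro h
    push Not at h
    obtain ⟨q, hq, hr⟩ := h
    exact ⟨q, hq, by simpa using hr⟩
  · rintro ⟨q, hq, rfl⟩ h
    exact absurd (by simp : (q.1 == q.1) = true) (by simpa using h q hq)

theorem pv_summar_append (ps : List (Nat × Nat)) (x : Nat × Nat) :
    pvSummar (ps ++ [x]) = pvUpd (pvSummar ps) x := by
  simp [pvSummar, List.foldl_append]

theorem pv_rowsOf_append (ps : List (Nat × Nat)) (x : Nat × Nat) :
    pvRowsOf (ps ++ [x]) = if x.1 ∈ pvRowsOf ps then pvRowsOf ps else pvRowsOf ps ++ [x.1] := by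
  rw [pvRowsOf, List.map_append, PySem.Set.ofList_eq_foldl, List.foldl_append,
    ← PySem.Set.ofList_eq_foldl]
  simp only [List.map_cons, List.map_nil, List.foldl_cons, List.foldl_nil]
  rw [pvRowsOf]
  simp only [PySem.Set.add, PySem.Set.contains]
  by_cases hm : x.1 ∈ PySem.Set.ofList (List.map Prod.fst ps)
  · rw [if_pos (List.contains_iff_mem.mpr hm), if_pos hm]
  · rw [if_neg (fun hc => hm (List.contains_iff_mem.mp hc)), if_neg hm]

theorem pv_colsOf_append (ps : List (Nat × Nat)) (x : Nat × Nat) (r : Nat) :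
    pvColsOf (ps ++ [x]) r = pvColsOf ps r ++ (if x.1 = r then [x.2] else []) := by
  rw [pvColsOf, pvColsOf, List.filter_append, List.map_append]
  congr 1
  by_cases h : x.1 = r <;> simp [h]

theorem pv_summar_items (ps : List (Nat × Nat)) :
    (pvSummar ps).items = (pvRowsOf ps).map (fun r => (r, pvTriple ps r)) := by
  induction ps using List.reverseRecOn with
  | nil => rfl
  | append_singleton ps x ih =>
    have hkeys : (pvSummar ps).keys = pvRowsOf ps := by
      simp [PySem.Dict.keys, ih, List.map_map, Function.comp_def]
    have hnd : (pvSummar ps).keys.Nodup := by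
      rw [hkeys]; exact PySem.Set.nodup_ofList _
    rw [pv_summar_append, pv_rowsOf_append]
    by_cases hx : x.1 ∈ pvRowsOf ps
    · have hmemitems : (x.1, pvTriple ps x.1) ∈ (pvSummar ps).items := by
        rw [ih]
        exact List.mem_map_of_mem hx
      have hget : (pvSummar ps).get? x.1 = some (pvTriple ps x.1) :=
        PySem.Dict.get?_of_mem_items _ hmemitems hnd
      have hcont : (pvSummar ps).contains x.1 = true := by
        rw [PySem.Dict.contains_eq_decide_mem_keys, hkeys]; simpa using hx
      have hcne : pvColsOf ps x.1 ≠ [] :=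
        (pv_colsOf_ne_nil_iff ps x.1).mpr ((pv_mem_rowsOf ps x.1).mp hx)
      rw [pvUpd, hget]
      simp only [pvTriple]
      rw [PySem.Dict.items_insert_of_contains _ _ hcont, ih, List.map_map, if_pos hx]
      apply List.map_congr_left
      intro a ha
      by_cases har : a = x.1
      · subst har
        simp only [Function.comp_apply, beq_self_eq_true, if_pos]
        obtain ⟨c0, l, hcl⟩ : ∃ c0 l, pvColsOf ps x.1 = c0 :: l := by
          cases hc : pvColsOf ps x.1 with
          | nil => exact absurd hc hcne
          | cons c0 l => exact ⟨c0, l, rfl⟩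
        have h1 : pvColsOf (ps ++ [x]) x.1 = (c0 :: l) ++ [x.2] := by
          rw [pv_colsOf_append, hcl, if_pos rfl]
        have hh : (pvColsOf (ps ++ [x]) x.1).headD 0 = c0 := by rw [h1]; rfl
        have hlast : (pvColsOf (ps ++ [x]) x.1).getLastD 0 = x.2 := by
          rw [h1, List.getLastD_concat]
        have hlen : (pvColsOf (ps ++ [x]) x.1).length = l.length + 2 := by rw [h1]; simp
        rw [hh, hlast, hlen, hcl]
        rfl
      · have hne : (a == x.1) = false := by simpa using har
        simp only [Function.comp_apply, hne, if_neg, Bool.false_eq_true, not_false_iff]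
        simp [pvTriple, pv_colsOf_append, Ne.symm har]
    · have hget : (pvSummar ps).get? x.1 = none := by
        rw [PySem.Dict.get?_eq_none_iff_not_mem_keys, hkeys]; exact hx
      have hcont : (pvSummar ps).contains x.1 = false := by
        rw [PySem.Dict.contains_eq_decide_mem_keys, hkeys]; simpa using hx
      have hcnil : pvColsOf ps x.1 = [] := by
        by_contra hc
        exact hx ((pv_mem_rowsOf ps x.1).mpr ((pv_colsOf_ne_nil_iff ps x.1).mp hc))
      rw [pvUpd, hget]
      rw [PySem.Dict.items_insert_of_not_contains _ _ hcont, ih, if_neg hx, List.map_append]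
      congr 1
      · apply List.map_congr_left
        intro a ha
        have har : a ≠ x.1 := fun h => hx (h ▸ ha)
        simp [pvTriple, pv_colsOf_append, Ne.symm har]
      · simp [pvTriple, pv_colsOf_append, hcnil]

def pvBodyA (out : List (List Int)) (p : Int × List (Nat × Nat)) : List (List Int) :=
  let color := p.1
  let positions := p.2
  let minr := (PySem.List.min? (positions.map Prod.fst) (fun x => x)).getD 0
  let maxr := (PySem.List.max? (positions.map Prod.fst) (fun x => x)).getD 0
  (List.range' minr (maxr + 1 - minr)).foldl (fun out r =>
    let colsInRow := PySem.List.sorted ((positions.filter (fun q => q.1 == r)).map Prod.snd)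
      (fun x => x) false
    if 2 ≤ colsInRow.length then
      pvFill out r (colsInRow.headD 0) (colsInRow.getLastD 0) color
    else out) out

def pvBodyB (out : List (List Int)) (p : Int × PySem.Dict Nat (Nat × Nat × Nat)) :
    List (List Int) :=
  p.2.items.foldl (fun out q =>
    if 2 ≤ q.2.2.2 then pvFill out q.1 q.2.1 q.2.2.1 p.1 else out) out

theorem pv_percolor (k : Int) (ps : List (Nat × Nat)) (hne : ps ≠ [])
    (hpw : ps.Pairwise pvLex) (out : List (List Int)) :
    pvBodyA out (k, ps) = pvBodyB out (k, pvSummar ps) := by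
  obtain ⟨mn, hmn⟩ : ∃ m, PySem.List.min? (ps.map Prod.fst) (fun x => x) = some m := by
    cases h : PySem.List.min? (ps.map Prod.fst) (fun x => x) with
    | none => exact absurd (by simpa using (PySem.List.min?_eq_none_iff _ _).mp h) hne
    | some m => exact ⟨m, rfl⟩
  obtain ⟨mx, hmx⟩ : ∃ m, PySem.List.max? (ps.map Prod.fst) (fun x => x) = some m := by
    cases h : PySem.List.max? (ps.map Prod.fst) (fun x => x) with
    | none => exact absurd (by simpa using (PySem.List.max?_eq_none_iff _ _).mp h) hne
    | some m => exact ⟨m, rfl⟩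
  have hmnle : ∀ r ∈ ps.map Prod.fst, mn ≤ r := PySem.List.min?_isMin hmn
  have hmxge : ∀ r ∈ ps.map Prod.fst, r ≤ mx := PySem.List.max?_isMax hmx
  have hmnmem : mn ∈ ps.map Prod.fst := PySem.List.min?_mem hmn
  have hmnmx : mn ≤ mx := hmxge mn hmnmem
  simp only [pvBodyA, pvBodyB, hmn, hmx, Option.getD_some]
  rw [pv_summar_items, List.foldl_map]
  -- replace A's sorted column list by the (already sorted) column list
  have hsorted : ∀ r : Nat,
      PySem.List.sorted ((ps.filter (fun q => q.1 == r)).map Prod.snd) (fun x => x) false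
        = pvColsOf ps r :=
    fun r => PySem.List.sorted_eq_of_perm_of_pairwise_lt _ _ _ (List.Perm.refl _)
      (pv_colsOf_pairwise ps hpw r)
  have hA : ∀ (acc : List (List Int)), ∀ r ∈ List.range' mn (mx + 1 - mn),
      (fun out r =>
        let colsInRow := PySem.List.sorted ((ps.filter (fun q => q.1 == r)).map Prod.snd)
          (fun x => x) false
        if 2 ≤ colsInRow.length then
          pvFill out r (colsInRow.headD 0) (colsInRow.getLastD 0) k
        else out) acc r
      = (fun out r =>
          if 2 ≤ (pvColsOf ps r).length then
            pvFill out r ((pvColsOf ps r).headD 0) ((pvColsOf ps r).getLastD 0) k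
          else out) acc r := by
    intro acc r _
    simp only [hsorted]
  rw [PySem.List.foldl_congr_mem _ _ _ _ hA]
  have hB : ∀ (acc : List (List Int)), ∀ r ∈ pvRowsOf ps,
      (fun out r =>
        if 2 ≤ (r, pvTriple ps r).2.2.2 then
          pvFill out (r, pvTriple ps r).1 (r, pvTriple ps r).2.1 (r, pvTriple ps r).2.2.1 k
        else out) acc r
      = (fun out r =>
          if 2 ≤ (pvColsOf ps r).length then
            pvFill out r ((pvColsOf ps r).headD 0) ((pvColsOf ps r).getLastD 0) k
          else out) acc r := by
    intro acc r _
    simp only [pvTriple]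
  rw [PySem.List.foldl_congr_mem _ _ _ _ hB]
  rw [PySem.List.foldl_ite_eq_foldl_filter
      (p := fun r => 2 ≤ (pvColsOf ps r).length)
      (f := fun out r =>
        pvFill out r ((pvColsOf ps r).headD 0) ((pvColsOf ps r).getLastD 0) k),
    PySem.List.foldl_ite_eq_foldl_filter
      (p := fun r => 2 ≤ (pvColsOf ps r).length)
      (f := fun out r =>
        pvFill out r ((pvColsOf ps r).headD 0) ((pvColsOf ps r).getLastD 0) k)]
  congr 1
  -- the two filtered row lists are equal
  have hpw1 : (List.range' mn (mx + 1 - mn)).Pairwise (fun a b : Nat => a < b) :=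
    List.pairwise_lt_range' 1
  have hpw2 : (pvRowsOf ps).Pairwise (fun a b : Nat => a < b) := pv_rowsOf_pairwise ps hpw
  have hf1 := List.Pairwise.sublist (List.filter_sublist
    (p := fun r => decide (2 ≤ (pvColsOf ps r).length))) hpw1
  have hf2 := List.Pairwise.sublist (List.filter_sublist
    (p := fun r => decide (2 ≤ (pvColsOf ps r).length))) hpw2
  have hnd1 : ((List.range' mn (mx + 1 - mn)).filter
      (fun r => decide (2 ≤ (pvColsOf ps r).length))).Nodup :=
    hf1.imp (fun h => Nat.ne_of_lt h)
  have hnd2 : ((pvRowsOf ps).filter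
      (fun r => decide (2 ≤ (pvColsOf ps r).length))).Nodup :=
    hf2.imp (fun h => Nat.ne_of_lt h)
  refine PySem.List.eq_of_perm_of_pairwise_le_of_injective (fun x : Nat => x)
    (fun a b h => h) ?_ (hf1.imp le_of_lt) (hf2.imp le_of_lt)
  rw [List.perm_ext_iff_of_nodup hnd1 hnd2]
  intro a
  simp only [List.mem_filter, decide_eq_true_eq]
  constructor
  · rintro ⟨-, hlen⟩
    have hcne : pvColsOf ps a ≠ [] := by
      intro h; rw [h] at hlen; simp at hlen
    exact ⟨(pv_mem_rowsOf ps a).mpr ((pv_colsOf_ne_nil_iff ps a).mp hcne), hlen⟩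
  · rintro ⟨hmem, hlen⟩
    have hmap := (pv_mem_rowsOf ps a).mp hmem
    have h1 := hmnle a hmap
    have h2 := hmxge a hmap
    exact ⟨List.mem_range'_1.mpr ⟨h1, by omega⟩, hlen⟩

def pvCp (grid : List (List Int)) : PySem.Dict Int (List (Nat × Nat)) :=
  (pvCells grid).foldl (fun d p => d.modify (pvVal grid p) [] (fun l => l ++ [p]))
    PySem.Dict.empty

def pvSp (grid : List (List Int)) : PySem.Dict Int (PySem.Dict Nat (Nat × Nat × Nat)) :=
  (pvCells grid).foldl (fun d p => d.modify (pvVal grid p) PySem.Dict.empty (fun rs => pvUpd rs p))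
    PySem.Dict.empty

theorem pv_A_eq (grid : List (List Int)) :
    solve_22eb0ac0 grid = (pvCp grid).items.foldl pvBodyA grid := by
  simp only [solve_22eb0ac0, pvCp, pvCells, pvVal]
  have h := pv_foldl_range_range (σ := PySem.Dict Int (List (Nat × Nat)))
    grid.length (grid.headD []).length
    (fun d r c => if (grid.getD r []).getD c 0 ≠ 0 then
      d.modify ((grid.getD r []).getD c 0) [] (fun l => l ++ [(r, c)]) else d)
    PySem.Dict.empty
  beta_reduce at h
  rw [h]
  have h2 := PySem.List.foldl_ite_eq_foldl_filter
    (p := fun p : Nat × Nat => (grid.getD p.1 []).getD p.2 0 ≠ 0)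
    (f := fun d (p : Nat × Nat) =>
      d.modify ((grid.getD p.1 []).getD p.2 0) [] (fun l => l ++ [p]))
    (l := (List.range grid.length).flatMap
      (fun r => (List.range (grid.headD []).length).map (fun c => (r, c))))
    (init := (PySem.Dict.empty : PySem.Dict Int (List (Nat × Nat))))
  beta_reduce at h2
  rw [h2]
  rfl

theorem pv_B_eq (grid : List (List Int)) :
    solve_22eb0ac0_alt grid = (pvSp grid).items.foldl pvBodyB grid := by
  simp only [solve_22eb0ac0_alt, pvSp, pvCells, pvVal]
  have h := pv_foldl_range_range (σ := PySem.Dict Int (PySem.Dict Nat (Nat × Nat × Nat)))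
    grid.length (grid.headD []).length
    (fun d r c => if (grid.getD r []).getD c 0 ≠ 0 then
      d.modify ((grid.getD r []).getD c 0) PySem.Dict.empty (fun rs => pvUpd rs (r, c)) else d)
    PySem.Dict.empty
  beta_reduce at h
  rw [h]
  have h2 := PySem.List.foldl_ite_eq_foldl_filter
    (p := fun p : Nat × Nat => (grid.getD p.1 []).getD p.2 0 ≠ 0)
    (f := fun d (p : Nat × Nat) =>
      d.modify ((grid.getD p.1 []).getD p.2 0) PySem.Dict.empty (fun rs => pvUpd rs p))
    (l := (List.range grid.length).flatMap
      (fun r => (List.range (grid.headD []).length).map (fun c => (r, c))))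
    (init := (PySem.Dict.empty : PySem.Dict Int (PySem.Dict Nat (Nat × Nat × Nat))))
  beta_reduce at h2
  rw [h2]
  rfl

theorem pv_cp_keys (grid : List (List Int)) :
    (pvCp grid).keys = PySem.Set.ofList ((pvCells grid).map (pvVal grid)) := by
  rw [pvCp, PySem.Dict.keys_foldl_modify_key (pvCells grid) (pvVal grid) []
    (fun _ p => fun l => l ++ [p]) PySem.Dict.empty, PySem.Dict.keys_empty]
  rfl

theorem pv_sp_keys (grid : List (List Int)) :
    (pvSp grid).keys = PySem.Set.ofList ((pvCells grid).map (pvVal grid)) := by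
  rw [pvSp, PySem.Dict.keys_foldl_modify_key (pvCells grid) (pvVal grid) PySem.Dict.empty
    (fun _ p => fun rs => pvUpd rs p) PySem.Dict.empty, PySem.Dict.keys_empty]
  rfl

theorem pv_cp_nodup (grid : List (List Int)) : (pvCp grid).keys.Nodup := by
  rw [pv_cp_keys]; exact PySem.Set.nodup_ofList _

theorem pv_sp_nodup (grid : List (List Int)) : (pvSp grid).keys.Nodup := by
  rw [pv_sp_keys]; exact PySem.Set.nodup_ofList _

theorem pv_cp_getD (grid : List (List Int)) (v : Int) :
    (pvCp grid).getD v [] = (pvCells grid).filter (fun p => pvVal grid p == v) := by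
  rw [pvCp, pv_getD_foldl_modify_key (pvVal grid) [] (fun l p => l ++ [p]) (pvCells grid)
    PySem.Dict.empty v, PySem.Dict.getD_empty]
  exact PySem.List.foldl_append_singleton_eq_self _ _ |>.trans (List.nil_append _)

theorem pv_sp_getD (grid : List (List Int)) (v : Int) :
    (pvSp grid).getD v PySem.Dict.empty
      = pvSummar ((pvCells grid).filter (fun p => pvVal grid p == v)) := by
  rw [pvSp, pv_getD_foldl_modify_key (pvVal grid) PySem.Dict.empty pvUpd (pvCells grid)
    PySem.Dict.empty v, PySem.Dict.getD_empty]
  rfl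

theorem pv_main (grid : List (List Int)) : solve_22eb0ac0 grid = solve_22eb0ac0_alt grid := by
  rw [pv_A_eq, pv_B_eq]
  rw [PySem.Dict.items_eq_map_keys _ (pv_cp_nodup grid) [],
    PySem.Dict.items_eq_map_keys _ (pv_sp_nodup grid) PySem.Dict.empty,
    pv_cp_keys, pv_sp_keys, List.foldl_map, List.foldl_map]
  apply PySem.List.foldl_congr_mem
  intro acc k hk
  rw [pv_cp_getD, pv_sp_getD]
  have hne : (pvCells grid).filter (fun p => pvVal grid p == k) ≠ [] := by
    rw [PySem.Set.mem_ofList, List.mem_map] at hk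
    obtain ⟨p, hp, rfl⟩ := hk
    exact List.ne_nil_of_mem (List.mem_filter.mpr ⟨hp, by simp⟩)
  have hpw : ((pvCells grid).filter (fun p => pvVal grid p == k)).Pairwise pvLex :=
    List.Pairwise.sublist List.filter_sublist (pv_cells_pairwise grid)
  exact pv_percolor k _ hne hpw acc

-- ===== VERDICT (by name: the statement is the Claim_ definition above) =====
theorem solve_22eb0ac0_spec : Claim_equal_solve_22eb0ac0 := by
  intro grid _ _
  unfold Spec_solve_22eb0ac0
  exact pv_main grid
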